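-- pv_equiv track=rewrite | github.com/FancyWaifu/polytool | devices.py | _format_component_version
-- ===== SOURCE A (Python) =====
-- def _format_component_version(raw: str) -> str:
--     """Convert a Poly per-component version string into human form.
--
--     Poly's FirmwareComponents dict stores the BCD bcdDevice as a flat decimal
--     string: "1082" → "10.82", "0315" → "3.15", "3038" → "30.38". A handful of
--     components (notably setid) ship as already-dotted strings ("0.0.2134.3260"),
--     so leave anything containing a dot alone.
--     """
--     if not raw or not isinstance(raw, str):
--         return raw or ""
--     if "." in raw:
--         return raw
--     digits = "".join(c for c in raw if c.isdigit()) or raw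
--     if len(digits) <= 2:
--         return "0." + digits.zfill(2)
--     return digits[:-2].lstrip("0") + "." + digits[-2:] if digits[:-2].lstrip("0") else "0." + digits[-2:]
-- ===== SOURCE B (Python) =====
-- def _format_component_version(raw: str) -> str:
--     """Same conversion via integer arithmetic: the digit characters encode an
--     integer number of hundredths, rendered with divmod(n, 100)."""
--     if not raw or not isinstance(raw, str):
--         return raw or ""
--     if "." in raw:
--         return raw
--     n = None
--     for c in raw:
--         if "0" <= c <= "9":
--             n = (0 if n is None else n) * 10 + ord(c) - 48
--     if n is not None:
--         return "%d.%02d" % divmod(n, 100)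
--     # raw has no digit characters at all, hence no '0' either: A's lstrip is a
--     # no-op here, so the degenerate split needs no stripping branch.
--     if len(raw) <= 2:
--         return "0." + raw.zfill(2)
--     return raw[:-2] + "." + raw[-2:]
-- ===== Notes on version B (the rewrite author's own statement) =====
-- stated objective: alternative
-- what changed: Instead of building a filtered digit string and formatting it with zfill/slicing/lstrip, B accumulates the digits' integer value in one optional accumulator pass and renders major/minor via divmod(n, 100) and %02d formatting; the no-digit fallback is a plain split of raw with no stripping (raw contains no '0' there).
import Mathlib
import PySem

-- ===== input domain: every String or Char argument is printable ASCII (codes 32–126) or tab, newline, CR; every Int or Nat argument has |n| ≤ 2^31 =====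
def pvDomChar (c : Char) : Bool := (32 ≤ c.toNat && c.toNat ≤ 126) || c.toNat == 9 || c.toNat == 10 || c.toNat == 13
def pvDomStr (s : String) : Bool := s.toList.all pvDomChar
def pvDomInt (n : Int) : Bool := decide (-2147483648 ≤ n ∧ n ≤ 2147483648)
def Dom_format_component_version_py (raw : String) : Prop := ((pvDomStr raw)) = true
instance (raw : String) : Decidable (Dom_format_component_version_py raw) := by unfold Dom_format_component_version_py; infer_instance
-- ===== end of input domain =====

-- B replaces A's zfill/slice/lstrip formatting of a filtered digit string by integer
-- arithmetic: an Option accumulator collects the digits' value, rendered via divmod(n, 100);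
-- the no-digit fallback is a plain split (raw contains no '0' there); objective: alternative.

-- ===== PORT A =====
def format_component_version_py (raw : String) : String :=
  if raw = "" then ""
  else if PySem.Str.isIn "." raw then raw
  else
    let ds0 := (raw.toList).filter PySem.Chars.isdigit
    let digits := if ds0 = [] then raw.toList else ds0
    if digits.length ≤ 2 then
      String.ofList ('0' :: '.' :: PySem.Chars.zfill digits 2)
    else
      let head := (PySem.List.slice digits none (some (-2))).dropWhile (fun c => c = '0')
      if head ≠ [] then
        String.ofList (head ++ '.' :: PySem.List.slice digits (some (-2)) none)
      else
        String.ofList ('0' :: '.' :: PySem.List.slice digits (some (-2)) none)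

-- ===== PORT B =====
def format_component_version_py_alt (raw : String) : String :=
  if raw = "" then ""
  else if PySem.Str.isIn "." raw then raw
  else
    let n : Option Int := (raw.toList).foldl
      (fun a c => if '0' ≤ c ∧ c ≤ '9' then some ((a.getD 0) * 10 + ((c.toNat : Int) - 48)) else a)
      none
    match n with
    | some v =>
        String.ofList (PySem.Int.toChars (PySem.Int.floordiv v 100)
          ++ '.' :: PySem.Chars.zfill (PySem.Int.toChars (PySem.Int.mod v 100)) 2)
    | none =>
        -- raw has no digit characters, hence no '0': Python A's lstrip would be a no-op
        if raw.toList.length ≤ 2 then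
          String.ofList ('0' :: '.' :: PySem.Chars.zfill raw.toList 2)
        else
          String.ofList (PySem.List.slice raw.toList none (some (-2))
            ++ '.' :: PySem.List.slice raw.toList (some (-2)) none)

-- ===== PRECONDITION & SPEC =====
def Spec_format_component_version_py (raw : String) (out : String) : Prop := out = format_component_version_py_alt raw
instance (raw : String) (out : String) : Decidable (Spec_format_component_version_py raw out) := by unfold Spec_format_component_version_py; infer_instance

-- ===== CLAIM (what is proved, stated in full; the proofs are below) =====
def Claim_equal_format_component_version_py : Prop := ∀ (raw : String), Dom_format_component_version_py raw → Spec_format_component_version_py raw (format_component_version_py raw)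

-- ===== LEMMAS AND PROOFS =====

theorem pv_digit_bounds (c : Char) (hc : PySem.Chars.isdigit c = true) : 48 ≤ c.toNat ∧ c.toNat ≤ 57 := by
  simp only [PySem.Chars.isdigit, Bool.and_eq_true, decide_eq_true_eq, Char.le_def,
    UInt32.le_iff_toNat_le] at hc
  exact hc

theorem pv_test_iff (c : Char) : ('0' ≤ c ∧ c ≤ '9') ↔ PySem.Chars.isdigit c = true := by
  simp only [PySem.Chars.isdigit, Bool.and_eq_true, decide_eq_true_eq]

theorem pv_digitChar_of_digit (c : Char) (h : PySem.Chars.isdigit c = true) :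
    Nat.digitChar (c.toNat - 48) = c := by
  obtain ⟨h1, h2⟩ := pv_digit_bounds c h
  rw [← Char.ofNat_toNat c]
  interval_cases h3 : c.toNat <;> rfl

def pvValN (l : List Char) : Nat := l.foldl (fun a c => a * 10 + (c.toNat - 48)) 0
def pvGo (n : Nat) : List Char :=
  if h : n < 10 then [Nat.digitChar n]
  else pvGo (n / 10) ++ [Nat.digitChar (n % 10)]
decreasing_by exact Nat.div_lt_self (by omega) (by omega)

theorem pv_toDigitsCore_eq_go : ∀ (f n : Nat) (acc : List Char), n < f →
    Nat.toDigitsCore 10 f n acc = pvGo n ++ acc := by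
  intro f
  induction f with
  | zero => intro n acc h; omega
  | succ f ih =>
    intro n acc h
    rw [Nat.toDigitsCore]
    by_cases h10 : n / 10 = 0
    · have hn : n < 10 := by omega
      rw [pvGo]
      simp [hn, Nat.mod_eq_of_lt hn]
    · have hn : ¬ n < 10 := by omega
      rw [ih (n / 10) _ (by omega)]
      conv_rhs => rw [pvGo]
      simp [hn]

theorem pv_valN_aux (l : List Char) : ∀ (a : Nat),
    l.foldl (fun a c => a * 10 + (c.toNat - 48)) a = a * 10 ^ l.length + pvValN l := by
  induction l with
  | nil => intro a; simp [pvValN]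
  | cons c cs ih =>
    intro a
    have h1 := ih (a * 10 + (c.toNat - 48))
    have h2 := ih (c.toNat - 48)
    simp only [List.foldl_cons, List.length_cons] at *
    rw [h1]
    have : pvValN (c :: cs) = (c.toNat - 48) * 10 ^ cs.length + pvValN cs := by
      simp only [pvValN, List.foldl_cons]
      simpa using h2
    rw [this]; ring

theorem pv_valN_append (l m : List Char) :
    pvValN (l ++ m) = pvValN l * 10 ^ m.length + pvValN m := by
  simp only [pvValN, List.foldl_append]
  rw [pv_valN_aux]; rfl

theorem pv_valN_lt (l : List Char) (h : ∀ c ∈ l, PySem.Chars.isdigit c = true) :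
    pvValN l < 10 ^ l.length := by
  induction l with
  | nil => simp [pvValN]
  | cons c cs ih =>
    have hc := h c (by simp)
    have hcs := ih (fun x hx => h x (List.mem_cons_of_mem _ hx))
    have hv : c.toNat - 48 < 10 := by
      have := pv_digit_bounds c hc
      omega
    have : pvValN (c :: cs) = (c.toNat - 48) * 10 ^ cs.length + pvValN cs := by
      simp only [pvValN, List.foldl_cons]
      simpa using pv_valN_aux cs (c.toNat - 48)
    rw [this]
    simp only [List.length_cons, pow_succ]
    nlinarith

theorem pv_valN_cons (c : Char) (cs : List Char) :
    pvValN (c :: cs) = (c.toNat - 48) * 10 ^ cs.length + pvValN cs := by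
  simp only [pvValN, List.foldl_cons]
  simpa using pv_valN_aux cs (c.toNat - 48)

theorem pv_valN_pos (c : Char) (cs : List Char) (hc : PySem.Chars.isdigit c = true)
    (h0 : c ≠ '0') : 1 ≤ pvValN (c :: cs) := by
  have hb := pv_digit_bounds c hc
  have hne : c.toNat ≠ 48 := by
    intro h; apply h0; rw [← Char.ofNat_toNat c, h]
  rw [pv_valN_cons]
  have hp : 1 ≤ 10 ^ cs.length := Nat.one_le_pow _ _ (by omega)
  have h1 : 1 ≤ c.toNat - 48 := by omega
  nlinarith

theorem pv_valN_dropWhile (l : List Char) :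
    pvValN (l.dropWhile (fun c => c = '0')) = pvValN l := by
  induction l with
  | nil => rfl
  | cons c cs ih =>
    by_cases h : c = '0'
    · subst h
      rw [List.dropWhile_cons_of_pos (by simp), ih, pv_valN_cons]
      simp
    · rw [List.dropWhile_cons_of_neg (by simp [h])]

theorem pv_go_valN_stripped (l : List Char) (h : ∀ c ∈ l, PySem.Chars.isdigit c = true)
    (hne : l ≠ []) (h0 : l.head hne ≠ '0') : pvGo (pvValN l) = l := by
  induction l using List.reverseRecOn with
  | nil => exact absurd rfl hne
  | append_singleton es d ih =>
    by_cases hes : es = []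
    · subst hes
      have hd := h d (by simp)
      have hb := pv_digit_bounds d hd
      simp only [List.nil_append] at *
      have hv : pvValN [d] = d.toNat - 48 := by simp [pvValN]
      rw [pvGo, hv, dif_pos (by omega)]
      rw [pv_digitChar_of_digit d hd]
    · have hhead : es.head hes ≠ '0' := by
        rw [← List.head_append_left (l₂ := [d]) hes]
        exact h0
      have hes1 : 1 ≤ pvValN es := by
        obtain ⟨c, cs, rfl⟩ := List.exists_cons_of_ne_nil hes
        exact pv_valN_pos c cs (h c (by simp)) hhead
      have hd := h d (by simp)
      have hb := pv_digit_bounds d hd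
      have hval : pvValN (es ++ [d]) = pvValN es * 10 + (d.toNat - 48) := by
        rw [pv_valN_append]; simp [pvValN]
      rw [hval, pvGo]
      have h10 : ¬ (pvValN es * 10 + (d.toNat - 48) < 10) := by
        have : 1 ≤ pvValN es := hes1
        omega
      rw [dif_neg h10]
      have hdiv : (pvValN es * 10 + (d.toNat - 48)) / 10 = pvValN es := by omega
      have hmod : (pvValN es * 10 + (d.toNat - 48)) % 10 = d.toNat - 48 := by omega
      rw [hdiv, hmod, pv_digitChar_of_digit d hd,
        ih (fun c hc => h c (List.mem_append_left _ hc)) hes hhead]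

theorem pv_go_valN (l : List Char) (h : ∀ c ∈ l, PySem.Chars.isdigit c = true) :
    pvGo (pvValN l) =
      if l.dropWhile (fun c => c = '0') = [] then ['0'] else l.dropWhile (fun c => c = '0') := by
  rw [← pv_valN_dropWhile l]
  set s := l.dropWhile (fun c => c = '0') with hs
  by_cases hsnil : s = []
  · rw [hsnil, if_pos rfl]
    have h0 : pvValN ([] : List Char) = 0 := rfl
    rw [h0, pvGo]
    norm_num
    rfl
  · rw [if_neg hsnil]
    apply pv_go_valN_stripped s (fun c hc => h c ((List.dropWhile_sublist _).subset hc)) hsnil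
    have := List.head_dropWhile_not (p := fun c => (c = '0' : Bool)) (l := l) hsnil
    simpa using this

theorem pv_slice_to (l : List Char) :
    PySem.List.slice l none (some (-2)) = l.take (l.length - 2) := by
  simp only [PySem.List.slice, PySem.List.clampIdx]
  rw [if_pos (by norm_num)]
  split_ifs with h
  · rw [show l.length - 2 = 0 by omega]
    simp
  · simp only [List.drop_zero, Nat.sub_zero]
    congr 1
    omega
theorem pv_slice_from (l : List Char) :
    PySem.List.slice l (some (-2)) none = l.drop (l.length - 2) := by
  simp only [PySem.List.slice, PySem.List.clampIdx]
  rw [if_pos (by norm_num)]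
  split_ifs with h
  · rw [show l.length - 2 = 0 by omega]
    simp
  · have hk : ((l.length : Int) + -2).toNat = l.length - 2 := by omega
    rw [hk, List.take_of_length_le (by simp)]

theorem pv_fold_some (l : List Char) : ∀ (a : Nat),
    l.foldl (fun a c => if '0' ≤ c ∧ c ≤ '9' then some ((a.getD 0) * 10 + ((c.toNat : Int) - 48)) else a)
        (some (a : Int))
      = some (((l.filter PySem.Chars.isdigit).foldl (fun a c => a * 10 + (c.toNat - 48)) a : Nat) : Int) := by
  induction l with
  | nil => intro a; simp
  | cons c cs ih =>
    intro a
    by_cases hc : PySem.Chars.isdigit c = true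
    · have hb := pv_digit_bounds c hc
      simp only [List.foldl_cons, List.filter_cons_of_pos hc]
      rw [if_pos ((pv_test_iff c).mpr hc)]
      have : (Option.getD (some ((a : Nat) : Int)) 0) * 10 + ((c.toNat : Int) - 48)
          = ((a * 10 + (c.toNat - 48) : Nat) : Int) := by
        simp only [Option.getD_some]
        push_cast
        omega
      rw [this, ih]
    · have hf : List.filter PySem.Chars.isdigit (c :: cs) = List.filter PySem.Chars.isdigit cs :=
        List.filter_cons_of_neg (by simpa using hc)
      simp only [List.foldl_cons, hf]
      rw [if_neg (fun hp => hc ((pv_test_iff c).mp hp))]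
      exact ih a

theorem pv_fold_opt (l : List Char) :
    l.foldl (fun a c => if '0' ≤ c ∧ c ≤ '9' then some ((a.getD 0) * 10 + ((c.toNat : Int) - 48)) else a)
        none
      = if l.filter PySem.Chars.isdigit = [] then (none : Option Int)
        else some ((pvValN (l.filter PySem.Chars.isdigit) : Nat) : Int) := by
  induction l with
  | nil => simp
  | cons c cs ih =>
    by_cases hc : PySem.Chars.isdigit c = true
    · have hb := pv_digit_bounds c hc
      simp only [List.foldl_cons, List.filter_cons_of_pos hc]
      rw [if_pos ((pv_test_iff c).mpr hc)]
      have h1 : (Option.getD (none : Option Int) 0) * 10 + ((c.toNat : Int) - 48)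
          = ((c.toNat - 48 : Nat) : Int) := by
        simp only [Option.getD_none]
        push_cast
        omega
      rw [h1, pv_fold_some, if_neg (by simp)]
      congr 2
      simp only [pvValN, List.foldl_cons]
      congr 1
      omega
    · have hf : List.filter PySem.Chars.isdigit (c :: cs) = List.filter PySem.Chars.isdigit cs :=
        List.filter_cons_of_neg (by simpa using hc)
      simp only [List.foldl_cons, hf]
      rw [if_neg (fun hp => hc ((pv_test_iff c).mp hp))]
      exact ih

theorem pv_zfill_go (l : List Char) (h : ∀ c ∈ l, PySem.Chars.isdigit c = true)
    (h1 : 1 ≤ l.length) (h2 : l.length ≤ 2) :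
    PySem.Chars.zfill (pvGo (pvValN l)) 2 = PySem.Chars.zfill l 2 := by
  match l, h1, h2 with
  | [c], _, _ =>
    have hc := h c (by simp)
    rw [pv_go_valN _ h]
    by_cases h0 : c = '0'
    · subst h0
      rw [if_pos (by simp)]
    · rw [if_neg (by simp [h0])]
      rw [List.dropWhile_cons_of_neg (by simp [h0])]
  | [c1, c2], _, _ =>
    have hc1 := h c1 (by simp)
    have hc2 := h c2 (by simp)
    rw [pv_go_valN _ h]
    by_cases h0 : c1 = '0'
    · subst h0
      rw [List.dropWhile_cons_of_pos (by simp)]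
      by_cases h02 : c2 = '0'
      · subst h02
        rw [if_pos (by simp)]
        rfl
      · rw [if_neg (by simp [h02]), List.dropWhile_cons_of_neg (by simp [h02])]
        have hb2 := pv_digit_bounds c2 hc2
        have hsign : ¬ (c2 = '+' ∨ c2 = '-') := by
          rintro (rfl | rfl) <;> revert hb2 <;> decide
        have hrhs : PySem.Chars.zfill ['0', c2] 2 = ['0', c2] := by
          simp [PySem.Chars.zfill]
        rw [hrhs]
        simp only [PySem.Chars.zfill]
        rw [if_neg (by norm_num), if_neg hsign]
        rfl
    · rw [if_neg (by simp [h0]), List.dropWhile_cons_of_neg (by simp [h0])]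

theorem pv_toDigits_eq_go (n : Nat) : Nat.toDigits 10 n = pvGo n := by
  have := pv_toDigitsCore_eq_go (n + 1) n [] (Nat.lt_succ_self n)
  simpa [Nat.toDigits] using this

theorem pv_toChars_natCast (k : Nat) : PySem.Int.toChars (k : Int) = pvGo k := by
  simp only [PySem.Int.toChars]
  rw [if_neg (not_lt.mpr (Int.natCast_nonneg k)), Int.toNat_natCast]
  exact pv_toDigits_eq_go k

theorem pv_zfill_two (l : List Char) (h : l.length = 2) : PySem.Chars.zfill l 2 = l := by
  simp [PySem.Chars.zfill, h]

theorem pv_dropWhile_id (l : List Char) (h : ∀ c ∈ l, c ≠ '0') :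
    l.dropWhile (fun c => c = '0') = l := by
  cases l with
  | nil => rfl
  | cons c cs => exact List.dropWhile_cons_of_neg (by simp [h c (by simp)])

theorem pv_main (raw : String) :
    format_component_version_py raw = format_component_version_py_alt raw := by
  unfold format_component_version_py format_component_version_py_alt
  by_cases hraw : raw = ""
  · simp [hraw]
  rw [if_neg hraw, if_neg hraw]
  by_cases hdot : PySem.Str.isIn "." raw = true
  · rw [if_pos hdot, if_pos hdot]
  rw [if_neg hdot, if_neg hdot]
  simp only []
  rw [pv_fold_opt]
  by_cases hds : (raw.toList).filter PySem.Chars.isdigit = []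
  · -- no digit characters: B's none branch vs A with digits = raw.toList
    simp only [hds, if_true]
    have hnodig : ∀ c ∈ raw.toList, c ≠ '0' := by
      intro c hc h0
      have := List.filter_eq_nil_iff.mp hds c hc
      subst h0
      exact this (by decide)
    by_cases hL : raw.toList.length ≤ 2
    · rw [if_pos hL, if_pos hL]
    · rw [if_neg hL, if_neg hL]
      push_neg at hL
      rw [pv_slice_to]
      have hpre : ∀ c ∈ raw.toList.take (raw.toList.length - 2), c ≠ '0' :=
        fun c hc => hnodig c ((List.take_sublist _ _).subset hc)
      rw [pv_dropWhile_id _ hpre]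
      have hne : raw.toList.take (raw.toList.length - 2) ≠ [] := by
        intro h
        rw [List.take_eq_nil_iff] at h
        rcases h with h | h
        · omega
        · rw [h] at hL
          simp at hL
      rw [if_pos hne]
  · rw [if_neg hds]
    simp only [if_neg hds]
    set ds := (raw.toList).filter PySem.Chars.isdigit with hdsdef
    have hdig : ∀ c ∈ ds, PySem.Chars.isdigit c = true := fun c hc => List.of_mem_filter hc
    have hlen1 : 1 ≤ ds.length := by
      cases hd : ds with
      | nil => exact absurd hd hds
      | cons a b => simp
    rw [show PySem.Int.floordiv ((pvValN ds : Nat) : Int) 100 = ((pvValN ds / 100 : Nat) : Int) from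
          (Int.ofNat_fdiv _ _).symm,
        show PySem.Int.mod ((pvValN ds : Nat) : Int) 100 = ((pvValN ds % 100 : Nat) : Int) from
          (Int.ofNat_fmod _ _).symm,
        pv_toChars_natCast, pv_toChars_natCast]
    by_cases hL : ds.length ≤ 2
    · rw [if_pos hL]
      have hlt : pvValN ds < 100 := by
        have := pv_valN_lt ds hdig
        have h10 : (10:Nat) ^ ds.length ≤ 100 := by
          calc (10:Nat) ^ ds.length ≤ 10 ^ 2 := Nat.pow_le_pow_right (by omega) hL
          _ = 100 := by norm_num
        omega
      rw [Nat.div_eq_of_lt hlt, Nat.mod_eq_of_lt hlt]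
      rw [pv_zfill_go ds hdig hlen1 hL]
      rw [show pvGo 0 = ['0'] from by rw [pvGo]; norm_num; rfl]
      rfl
    · rw [if_neg hL]
      push_neg at hL
      set pre := ds.take (ds.length - 2) with hpre
      set suf := ds.drop (ds.length - 2) with hsuf
      have hsuflen : suf.length = 2 := by
        rw [hsuf, List.length_drop]
        omega
      have hsufdig : ∀ c ∈ suf, PySem.Chars.isdigit c = true :=
        fun c hc => hdig c ((List.drop_sublist _ _).subset hc)
      have hpredig : ∀ c ∈ pre, PySem.Chars.isdigit c = true :=
        fun c hc => hdig c ((List.take_sublist _ _).subset hc)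
      have hsuflt : pvValN suf < 100 := by
        have := pv_valN_lt suf hsufdig
        rw [hsuflen] at this
        norm_num at this
        exact this
      have hsplit : pvValN ds = pvValN pre * 100 + pvValN suf := by
        conv_lhs => rw [← List.take_append_drop (ds.length - 2) ds]
        rw [pv_valN_append, hsuflen, ← hpre, ← hsuf]
        norm_num
      have hdiv : pvValN ds / 100 = pvValN pre := by omega
      have hmod : pvValN ds % 100 = pvValN suf := by omega
      rw [hdiv, hmod, pv_slice_to, pv_slice_from, ← hpre, ← hsuf]
      rw [pv_zfill_go suf hsufdig (by omega) (by omega), pv_zfill_two suf hsuflen]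
      rw [pv_go_valN pre hpredig]
      by_cases hhead : pre.dropWhile (fun c => c = '0') = []
      · rw [if_pos hhead, if_neg (not_not_intro hhead)]
        rfl
      · rw [if_neg hhead, if_pos hhead]

-- ===== VERDICT (by name: the statement is the Claim_ definition above) =====
theorem format_component_version_py_spec : Claim_equal_format_component_version_py := by
  intro raw _
  unfold Spec_format_component_version_py
  exact pv_main raw
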